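-- pv_equiv track=rewrite | github.com/hyun7586/PS_STUDY | WEEK10/BOJ_1987/LSY/LSY_BOJ_1987.py | movecount
-- ===== SOURCE A (Python) =====
-- def movecount(R, C, board):
--     directions = [(-1, 0), (1, 0), (0, -1), (0, 1)]
--
--     def dfs(x, y, visited):
--         max_count = len(visited)
--
--         for dx, dy in directions:
--             nx = x + dx
--             ny = y + dy
--
--             if 0 <= nx < R and 0 <= ny < C and board[nx][ny] not in visited:      #새로운 칸으로 이동
--                 visited.add(board[nx][ny])
--                 max_count = max(max_count, dfs(nx, ny, visited))
--                 visited.remove(board[nx][ny])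
--
--         return max_count
--
--     return dfs(0, 0, {board[0][0]})
-- ===== SOURCE B (Python) =====
-- def movecount(R, C, board):
--     best = 0
--     stack = [(0, 0, frozenset((board[0][0],)))]
--     while stack:
--         x, y, vis = stack.pop()
--         if len(vis) > best:
--             best = len(vis)
--         for nx, ny in ((x - 1, y), (x + 1, y), (x, y - 1), (x, y + 1)):
--             if 0 <= nx < R and 0 <= ny < C:
--                 c = board[nx][ny]
--                 if c not in vis:
--                     stack.append((nx, ny, vis | {c}))
--     return best
-- ===== Notes on version B (the rewrite author's own statement) =====
-- stated objective: alternative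
-- what changed: Replaced the recursive backtracking DFS (one mutated visited set with add/remove and a per-call max) by an iterative explicit-stack DFS that carries an immutable visited frozenset in each stack entry and tracks a single running best maximum.
-- outside the precondition, e.g. on movecount(2, 2, [['a', 'a'], ['a']]): A returns 1, B returns 1
import Mathlib
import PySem

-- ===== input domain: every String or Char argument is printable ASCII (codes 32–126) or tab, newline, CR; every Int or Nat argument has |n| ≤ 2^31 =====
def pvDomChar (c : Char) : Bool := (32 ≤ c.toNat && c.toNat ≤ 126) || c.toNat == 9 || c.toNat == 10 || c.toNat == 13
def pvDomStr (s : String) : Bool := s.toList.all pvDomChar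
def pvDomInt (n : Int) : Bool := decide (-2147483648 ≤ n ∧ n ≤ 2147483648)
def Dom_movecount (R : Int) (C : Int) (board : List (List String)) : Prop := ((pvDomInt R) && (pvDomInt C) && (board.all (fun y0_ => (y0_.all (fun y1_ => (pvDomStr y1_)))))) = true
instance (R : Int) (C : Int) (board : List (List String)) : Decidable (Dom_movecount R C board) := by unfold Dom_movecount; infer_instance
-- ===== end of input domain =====

-- B replaces A's recursive backtracking DFS (single mutated visited set with add/remove)
-- by an explicit-stack iterative DFS carrying an immutable visited snapshot per stack entry
-- and a running best maximum; same exponential cost.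

-- ===== PORT A =====
-- board[nx][ny] (none = IndexError; Python raises there, outside Pre_)
def pvCell (board : List (List String)) (nx ny : Int) : Option String :=
  (PySem.List.pyGet? board nx).bind (fun row => PySem.List.pyGet? row ny)

-- A's in-bounds / not-yet-visited check before moving to (nx, ny); returns the
-- successor state (nx, ny, visited ∪ {board[nx][ny]}) when the move is allowed
def pvOptChild (R C : Int) (board : List (List String)) (v : PySem.Set String)
    (nx ny : Int) : Option (Int × Int × PySem.Set String) :=
  if 0 ≤ nx ∧ nx < R ∧ 0 ≤ ny ∧ ny < C then
    match pvCell board nx ny with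
    | some c => if PySem.Set.contains v c then none else some (nx, ny, PySem.Set.add v c)
    | none => none   -- Python raises IndexError here; excluded by Pre_
  else none

-- termination measure for A's recursion: number of distinct board letters not yet visited
def pvGap (board : List (List String)) (v : PySem.Set String) : Nat :=
  ((PySem.Set.ofList board.flatten).filter (fun c => !(PySem.Set.contains v c))).length

theorem pv_filter_le {α : Type} (L : List α) (p q : α → Bool)
    (h : ∀ x, q x = true → p x = true) : (L.filter q).length ≤ (L.filter p).length := by
  induction L with
  | nil => simp
  | cons a L ih =>
    by_cases hq : q a = true
    · simp only [List.filter, hq, h a hq]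
      simpa using ih
    · simp only [List.filter, hq]
      cases hp : p a <;> simp <;> omega

theorem pv_filter_lt {α : Type} (L : List α) (p q : α → Bool)
    (h : ∀ x, q x = true → p x = true) (c : α) (hc : c ∈ L)
    (hpc : p c = true) (hqc : q c = false) :
    (L.filter q).length < (L.filter p).length := by
  induction L with
  | nil => simp at hc
  | cons a L ih =>
    rcases List.mem_cons.1 hc with rfl | hcL
    · simp only [List.filter, hqc, hpc]
      simpa using Nat.lt_succ_of_le (pv_filter_le L p q h)
    · by_cases hq : q a = true
      · simp only [List.filter, hq, h a hq]
        simpa using ih hcL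
      · simp only [List.filter, hq]
        have := ih hcL
        cases hp : p a <;> simp <;> omega

theorem pvOptChild_gap (R C : Int) (board : List (List String)) (v : PySem.Set String)
    (nx ny : Int) (s : Int × Int × PySem.Set String)
    (h : pvOptChild R C board v nx ny = some s) :
    pvGap board s.2.2 < pvGap board v := by
  rcases hcell : pvCell board nx ny with _ | c
  · unfold pvOptChild at h
    rw [hcell] at h
    split at h <;> simp at h
  · unfold pvOptChild at h
    rw [hcell] at h
    split at h
    · split at h
      · rename_i c' heq
        injection heq with hc
        subst hc
        split at h
        · simp at h
        · rename_i hcont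
          rw [Option.some_inj] at h
          subst h
          have hcv : c ∉ v := by
            intro hm
            exact hcont ((PySem.Set.contains_iff v c).2 hm)
          have hcfl : c ∈ board.flatten := by
            unfold pvCell at hcell
            rcases Option.bind_eq_some_iff.1 hcell with ⟨row, hrow, hcol⟩
            exact List.mem_flatten.2 ⟨row, PySem.List.mem_of_pyGet?_eq_some board hrow,
              PySem.List.mem_of_pyGet?_eq_some row hcol⟩
          unfold pvGap
          refine pv_filter_lt _ _ _ ?_ c ((PySem.Set.mem_ofList board.flatten c).2 hcfl)
            (by simpa using hcv) (by simp [PySem.Set.mem_add])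
          intro x hx
          simp [PySem.Set.mem_add] at hx
          simpa using hx.1
      · simp at h
    · simp at h

def pvDirs : List (Int × Int) := [(-1, 0), (1, 0), (0, -1), (0, 1)]

-- A's dfs: for each remaining direction in ds, try the move; m is the running max_count
def pvDfs (R C : Int) (board : List (List String)) (x y : Int) (v : PySem.Set String)
    (ds : List (Int × Int)) (m : Int) : Int :=
  match ds with
  | [] => m
  | d :: rest =>
    match h : pvOptChild R C board v (x + d.1) (y + d.2) with
    | none => pvDfs R C board x y v rest m
    | some s =>
      pvDfs R C board x y v rest
        (max m (pvDfs R C board s.1 s.2.1 s.2.2 pvDirs (PySem.Set.len s.2.2)))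
termination_by (pvGap board v, ds.length)
decreasing_by
  · exact Prod.Lex.right _ (by simp)
  · exact Prod.Lex.left _ _ (pvOptChild_gap R C board v _ _ s h)
  · exact Prod.Lex.right _ (by simp)

def movecount (R : Int) (C : Int) (board : List (List String)) : Int :=
  match pvCell board 0 0 with
  | some c =>
    pvDfs R C board 0 0 (PySem.Set.ofList [c]) pvDirs (PySem.Set.len (PySem.Set.ofList [c]))
  | none => 0   -- Python raises IndexError on board[0][0]; excluded by Pre_

-- ===== PORT B =====
-- B: explicit-stack iterative DFS. The Lean list's HEAD is the python stack's END (the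
-- element the next pop removes), so python's append is a cons here.

-- termination device only: the distinct strings a stack entry's visited set can still
-- grow by (every pushed letter is a board cell, or the "" placeholder getD yields on
-- boards outside Pre_, where the python raises IndexError)
def pvUnivB (board : List (List String)) : List String :=
  PySem.Set.ofList ("" :: board.flatten)

def pvGapB (board : List (List String)) (v : PySem.Set String) : Nat :=
  (pvUnivB board).countP (fun s => !(PySem.Set.contains v s))

-- one neighbour coordinate p of the popped cell: push (p, vis | {c}) when admissible.
-- Indices are nonnegative under the bounds test and in range on Pre_, where getD is
-- exactly python's board[nx][ny].
def pvPushB (R C : Int) (board : List (List String)) (v : PySem.Set String)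
    (st : List (Int × Int × PySem.Set String)) (p : Int × Int) :
    List (Int × Int × PySem.Set String) :=
  if 0 ≤ p.1 ∧ p.1 < R ∧ 0 ≤ p.2 ∧ p.2 < C then
    if PySem.Set.contains v ((board.getD p.1.toNat []).getD p.2.toNat "") then st
    else (p.1, p.2, PySem.Set.add v ((board.getD p.1.toNat []).getD p.2.toNat "")) :: st
  else st

-- the inner for loop over the four neighbour coordinates of the popped (x, y)
def pvStepB (R C : Int) (board : List (List String)) (x y : Int) (v : PySem.Set String)
    (st : List (Int × Int × PySem.Set String)) : List (Int × Int × PySem.Set String) :=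
  [(x - 1, y), (x + 1, y), (x, y - 1), (x, y + 1)].foldl (pvPushB R C board v) st

-- stack weight, the termination measure of the while loop
def pvWB (board : List (List String)) : List (Int × Int × PySem.Set String) → Nat
  | [] => 0
  | s :: t => 5 ^ pvGapB board s.2.2 + pvWB board t

theorem pvCountP_lt {α : Type} (l : List α) (p q : α → Bool)
    (himp : ∀ x, p x = true → q x = true) (c : α) (hc : c ∈ l)
    (hq : q c = true) (hp : p c = false) : l.countP p < l.countP q := by
  induction l with
  | nil => simp at hc
  | cons a t ih =>
    have hle : t.countP p ≤ t.countP q := List.countP_mono_left (fun x _ h => himp x h)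
    rcases List.mem_cons.1 hc with rfl | hct
    · simp [hp, hq]
      omega
    · have := ih hct
      cases h1 : p a
      · simp only [List.countP_cons, h1]
        cases h2 : q a <;> simp <;> omega
      · simp only [List.countP_cons, h1, himp a h1]
        omega

theorem pvGapB_add_lt (board : List (List String)) (v : PySem.Set String) (c : String)
    (hc : c ∈ pvUnivB board) (hv : PySem.Set.contains v c = false) :
    pvGapB board (PySem.Set.add v c) < pvGapB board v := by
  unfold pvGapB
  refine pvCountP_lt _ _ _ ?_ c hc (by simp only [hv, Bool.not_false]) ?_
  · intro x hx
    simp only [Bool.not_eq_true'] at hx ⊢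
    cases hcv : PySem.Set.contains v x
    · rfl
    · exfalso
      have hxv : x ∈ v := (PySem.Set.contains_iff v x).1 hcv
      have : x ∈ PySem.Set.add v c := by simp [PySem.Set.mem_add, hxv]
      rw [(PySem.Set.contains_iff _ x).2 this] at hx
      simp at hx
  · have : c ∈ PySem.Set.add v c := by simp [PySem.Set.mem_add]
    rw [(PySem.Set.contains_iff _ c).2 this]
    rfl

theorem pvCellB_mem_univ (board : List (List String)) (i j : Nat) :
    (board.getD i []).getD j "" ∈ pvUnivB board := by
  apply (PySem.Set.mem_ofList _ _).2
  rcases h1 : board[i]? with _ | row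
  · simp [List.getD, h1]
  · have hrow : row ∈ board := List.mem_of_getElem? h1
    rcases h2 : row[j]? with _ | x
    · simp [List.getD, h1, h2]
    · have hx : x ∈ row := List.mem_of_getElem? h2
      simp only [List.getD, h1, h2, Option.getD_some, List.mem_cons]
      exact Or.inr (List.mem_flatten.2 ⟨row, hrow, hx⟩)

theorem pvWB_pushB (R C : Int) (board : List (List String)) (v : PySem.Set String)
    (st : List (Int × Int × PySem.Set String)) (p : Int × Int) :
    pvWB board (pvPushB R C board v st p) ≤ 5 ^ (pvGapB board v - 1) + pvWB board st := by
  unfold pvPushB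
  split
  · split
    · exact Nat.le_add_left _ _
    · rename_i hcon
      have hlt := pvGapB_add_lt board v _ (pvCellB_mem_univ board p.1.toNat p.2.toNat)
        (by simpa using hcon)
      have hpow : 5 ^ pvGapB board (PySem.Set.add v ((board.getD p.1.toNat []).getD p.2.toNat ""))
          ≤ 5 ^ (pvGapB board v - 1) :=
        Nat.pow_le_pow_right (by norm_num) (by omega)
      simp only [pvWB]
      omega
  · exact Nat.le_add_left _ _

theorem pvWB_stepB_lt (R C : Int) (board : List (List String)) (x y : Int)
    (v : PySem.Set String) (st : List (Int × Int × PySem.Set String)) :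
    pvWB board (pvStepB R C board x y v st) < 5 ^ pvGapB board v + pvWB board st := by
  have h1 := pvWB_pushB R C board v st (x - 1, y)
  have h2 := pvWB_pushB R C board v (pvPushB R C board v st (x - 1, y)) (x + 1, y)
  have h3 := pvWB_pushB R C board v
    (pvPushB R C board v (pvPushB R C board v st (x - 1, y)) (x + 1, y)) (x, y - 1)
  have h4 := pvWB_pushB R C board v
    (pvPushB R C board v (pvPushB R C board v (pvPushB R C board v st (x - 1, y)) (x + 1, y))
      (x, y - 1)) (x, y + 1)
  simp only [pvStepB, List.foldl_cons, List.foldl_nil]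
  by_cases hg : pvGapB board v = 0
  · -- no push can happen: any push would strictly shrink an already-zero gap
    have hid : ∀ st' p, pvPushB R C board v st' p = st' := by
      intro st' p
      unfold pvPushB
      split
      · split
        · rfl
        · rename_i hcon
          exfalso
          have := pvGapB_add_lt board v _ (pvCellB_mem_univ board p.1.toNat p.2.toNat)
            (by simpa using hcon)
          omega
      · rfl
    rw [hid, hid, hid, hid]
    have : 0 < 5 ^ pvGapB board v := pow_pos (by norm_num) _
    omega
  · have hsplit : 5 ^ pvGapB board v = 5 * 5 ^ (pvGapB board v - 1) := by
      conv_lhs => rw [show pvGapB board v = (pvGapB board v - 1) + 1 by omega]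
      ring
    have hpos : 0 < 5 ^ (pvGapB board v - 1) := pow_pos (by norm_num) _
    omega

-- the while loop: pop (x, y, vis) from the stack head, update best, push neighbours
def pvLoopB (R C : Int) (board : List (List String)) :
    List (Int × Int × PySem.Set String) → Int → Int
  | [], best => best
  | (x, y, v) :: rest, best =>
    pvLoopB R C board (pvStepB R C board x y v rest)
      (if PySem.Set.len v > best then PySem.Set.len v else best)
termination_by st _ => pvWB board st
decreasing_by
  have h := pvWB_stepB_lt R C board x y v rest
  simp only [pvWB]
  omega

def movecount_alt (R : Int) (C : Int) (board : List (List String)) : Int :=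
  match board with
  | [] => 0            -- board[0][0]: python IndexError, outside Pre_
  | row :: _ =>
    match row with
    | [] => 0          -- likewise
    | c :: _ => pvLoopB R C board [(0, 0, PySem.Set.ofList [c])] 0

-- ===== PRECONDITION & SPEC =====
-- Pre_ requires board[0][0] to exist and, when R ≥ 1 and C ≥ 1, the board to actually have R
-- rows each of width ≥ C; A can also RETURN on a ragged/short board when repeated letters
-- happen to block the DFS from every missing cell, but that depends on running the search,
-- so such boards are excluded (see claim cites).
def Pre_movecount (R : Int) (C : Int) (board : List (List String)) : Prop :=
  board ≠ [] ∧ board.headD [] ≠ [] ∧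
    (1 ≤ R → 1 ≤ C → R ≤ (board.length : Int) ∧
      ∀ row ∈ board.take R.toNat, C ≤ (row.length : Int))
instance (R : Int) (C : Int) (board : List (List String)) : Decidable (Pre_movecount R C board) := by
  unfold Pre_movecount; infer_instance

def pvWitness_movecount : Int × Int × List (List String) :=
  (2, 2, [["a", "b"], ["c", "a"]])

def Spec_movecount (R : Int) (C : Int) (board : List (List String)) (out : Int) : Prop := out = movecount_alt R C board
instance (R : Int) (C : Int) (board : List (List String)) (out : Int) : Decidable (Spec_movecount R C board out) := by unfold Spec_movecount; infer_instance

-- ===== CLAIM (what is proved, stated in full; the proofs are below) =====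
def Claim_equal_movecount : Prop := ∀ (R : Int) (C : Int) (board : List (List String)), Dom_movecount R C board → Pre_movecount R C board → Spec_movecount R C board (movecount R C board)

-- ===== LEMMAS AND PROOFS =====

-- the value A's dfs computes from a state
def pvVal (R C : Int) (board : List (List String)) (s : Int × Int × PySem.Set String) : Int :=
  pvDfs R C board s.1 s.2.1 s.2.2 pvDirs (PySem.Set.len s.2.2)

def pvFold (R C : Int) (board : List (List String))
    (l : List (Int × Int × PySem.Set String)) (b : Int) : Int :=
  l.foldl (fun b s => max b (pvVal R C board s)) b

def pvKids (R C : Int) (board : List (List String)) (x y : Int)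
    (v : PySem.Set String) : List (Int × Int × PySem.Set String) :=
  pvDirs.filterMap (fun d => pvOptChild R C board v (x + d.1) (y + d.2))

theorem pvDfs_eq_fold (R C : Int) (board : List (List String)) (x y : Int)
    (v : PySem.Set String) (ds : List (Int × Int)) (m : Int) :
    pvDfs R C board x y v ds m =
      pvFold R C board (ds.filterMap (fun d => pvOptChild R C board v (x + d.1) (y + d.2))) m := by
  induction ds generalizing m with
  | nil => simp [pvDfs, pvFold]
  | cons d rest ih =>
    rw [pvDfs]
    rcases h : pvOptChild R C board v (x + d.1) (y + d.2) with _ | s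
    · simpa [List.filterMap, h] using ih m
    · simp only [List.filterMap_cons, h, pvFold, List.foldl_cons]
      exact ih _

theorem pvVal_eq (R C : Int) (board : List (List String)) (x y : Int) (v : PySem.Set String) :
    pvVal R C board (x, y, v) = pvFold R C board (pvKids R C board x y v) (PySem.Set.len v) := by
  rw [pvVal, pvDfs_eq_fold]; rfl

theorem pvFold_cons (R C : Int) (board : List (List String))
    (s : Int × Int × PySem.Set String) (l : List (Int × Int × PySem.Set String)) (b : Int) :
    pvFold R C board (s :: l) b = pvFold R C board l (max b (pvVal R C board s)) := rfl

theorem pvFold_append_singleton (R C : Int) (board : List (List String))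
    (l : List (Int × Int × PySem.Set String)) (s : Int × Int × PySem.Set String) (b : Int) :
    pvFold R C board (l ++ [s]) b = max (pvFold R C board l b) (pvVal R C board s) := by
  simp [pvFold, List.foldl_append]

theorem pvFold_append (R C : Int) (board : List (List String))
    (l1 l2 : List (Int × Int × PySem.Set String)) (b : Int) :
    pvFold R C board (l1 ++ l2) b = pvFold R C board l2 (pvFold R C board l1 b) := by
  simp [pvFold, List.foldl_append]

theorem pvFold_max (R C : Int) (board : List (List String))
    (l : List (Int × Int × PySem.Set String)) (a b : Int) :
    pvFold R C board l (max a b) = max a (pvFold R C board l b) := by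
  induction l generalizing b with
  | nil => simp [pvFold]
  | cons s l ih =>
    rw [pvFold_cons, max_assoc, ih, ← pvFold_cons]

theorem pvFold_reverse (R C : Int) (board : List (List String))
    (l : List (Int × Int × PySem.Set String)) (b : Int) :
    pvFold R C board l.reverse b = pvFold R C board l b := by
  induction l generalizing b with
  | nil => rfl
  | cons s l ih =>
    rw [List.reverse_cons, pvFold_append_singleton, ih, pvFold_cons,
      max_comm b (pvVal R C board s), pvFold_max, max_comm]

-- under Pre_, every cell the bounds test admits really exists, and getD reads it
theorem pv_cell_eq (R C : Int) (board : List (List String))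
    (hPre : Pre_movecount R C board) (nx ny : Int)
    (hb : 0 ≤ nx ∧ nx < R ∧ 0 ≤ ny ∧ ny < C) :
    pvCell board nx ny = some ((board.getD nx.toNat []).getD ny.toNat "") := by
  obtain ⟨-, -, hdim⟩ := hPre
  obtain ⟨hR, hrow⟩ := hdim (by omega) (by omega)
  have hnx : nx.toNat < board.length := by omega
  have hrmem : board[nx.toNat] ∈ board.take R.toNat := by
    have h' : nx.toNat < (board.take R.toNat).length := by
      simp only [List.length_take]
      omega
    have he := List.getElem_take (xs := board) (j := R.toNat) (i := nx.toNat) (h := h')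
    exact he ▸ List.getElem_mem h'
  have hC := hrow _ hrmem
  have hny : ny.toNat < board[nx.toNat].length := by omega
  rw [pvCell, PySem.List.pyGet?_eq_some_getElem board (by omega) (by omega)]
  rw [Option.bind_some,
    PySem.List.pyGet?_eq_some_getElem board[nx.toNat] (by omega) (by omega)]
  congr 1
  simp only [List.getD_eq_getElem?_getD, List.getElem?_eq_getElem hnx, Option.getD_some,
    List.getElem?_eq_getElem hny]

-- B's per-coordinate push is exactly A's per-direction child test
theorem pv_push_eq (R C : Int) (board : List (List String))
    (hPre : Pre_movecount R C board) (v : PySem.Set String)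
    (st : List (Int × Int × PySem.Set String)) (nx ny : Int) :
    pvPushB R C board v st (nx, ny) =
      match pvOptChild R C board v nx ny with
      | none => st
      | some s => s :: st := by
  unfold pvPushB pvOptChild
  by_cases hb : 0 ≤ nx ∧ nx < R ∧ 0 ≤ ny ∧ ny < C
  · rw [pv_cell_eq R C board hPre nx ny hb]
    simp only [hb]
    cases hcon : PySem.Set.contains v ((board.getD nx.toNat []).getD ny.toNat "") <;>
      simp [hcon]
  · simp [hb]

theorem pv_foldl_push (R C : Int) (board : List (List String))
    (hPre : Pre_movecount R C board) (v : PySem.Set String)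
    (ps : List (Int × Int)) (st : List (Int × Int × PySem.Set String)) :
    ps.foldl (pvPushB R C board v) st =
      (ps.filterMap (fun p => pvOptChild R C board v p.1 p.2)).reverse ++ st := by
  induction ps generalizing st with
  | nil => simp
  | cons p rest ih =>
    rw [List.foldl_cons, ih, List.filterMap_cons, pv_push_eq R C board hPre v st p.1 p.2]
    rcases pvOptChild R C board v p.1 p.2 with _ | s
    · rfl
    · simp

theorem pv_step_eq (R C : Int) (board : List (List String))
    (hPre : Pre_movecount R C board) (x y : Int) (v : PySem.Set String)
    (st : List (Int × Int × PySem.Set String)) :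
    pvStepB R C board x y v st = (pvKids R C board x y v).reverse ++ st := by
  rw [pvStepB, pv_foldl_push R C board hPre]
  congr 1
  rw [pvKids, pvDirs]
  simp [List.filterMap_cons, sub_eq_add_neg]

theorem pvLoopB_eq_fold (R C : Int) (board : List (List String))
    (hPre : Pre_movecount R C board) :
    ∀ n (st : List (Int × Int × PySem.Set String)) (best : Int), pvWB board st ≤ n →
      pvLoopB R C board st best = pvFold R C board st best := by
  intro n
  induction n using Nat.strong_induction_on with
  | _ n ih =>
    intro st best hle
    match st with
    | [] => rw [pvLoopB]; rfl
    | (x, y, v) :: rest =>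
      rw [pvLoopB]
      have hlt := pvWB_stepB_lt R C board x y v rest
      simp only [pvWB] at hle
      rw [ih (pvWB board (pvStepB R C board x y v rest)) (by omega) _ _ le_rfl]
      have hb : (if PySem.Set.len v > best then PySem.Set.len v else best)
          = max best (PySem.Set.len v) := by split_ifs <;> omega
      rw [hb, pv_step_eq R C board hPre, pvFold_append, pvFold_reverse, pvFold_max,
        ← pvVal_eq, pvFold_cons]

theorem pvDfs_ge (R C : Int) (board : List (List String)) (x y : Int)
    (v : PySem.Set String) (ds : List (Int × Int)) (m : Int) :
    m ≤ pvDfs R C board x y v ds m := by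
  induction ds generalizing m with
  | nil => simp [pvDfs]
  | cons d rest ih =>
    rw [pvDfs]
    rcases h : pvOptChild R C board v (x + d.1) (y + d.2) with _ | s
    · exact ih m
    · exact le_trans (le_max_left _ _) (ih _)

theorem pv_main (R C : Int) (board : List (List String))
    (hPre : Pre_movecount R C board) :
    movecount R C board = movecount_alt R C board := by
  rcases board with _ | ⟨row, bs⟩
  · exact absurd rfl hPre.1
  rcases row with _ | ⟨c, cs⟩
  · exact absurd List.headD_cons hPre.2.1
  unfold movecount movecount_alt
  have hcell : pvCell ((c :: cs) :: bs) 0 0 = some c := by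
    simp [pvCell]
  rw [hcell]
  dsimp only
  rw [pvLoopB_eq_fold R C ((c :: cs) :: bs) hPre
    (pvWB ((c :: cs) :: bs) [(0, 0, PySem.Set.ofList [c])]) _ _ le_rfl]
  have hge : (0 : Int) ≤ pvVal R C ((c :: cs) :: bs) (0, 0, PySem.Set.ofList [c]) := by
    refine le_trans ?_ (pvDfs_ge _ _ _ _ _ _ _ _)
    simp [PySem.Set.len]
  rw [pvFold_cons, max_eq_right hge]
  rfl

-- ===== VERDICT (by name: the statement is the Claim_ definition above) =====
theorem movecount_spec : Claim_equal_movecount := by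
  intro R C board _ hPre
  unfold Spec_movecount
  exact pv_main R C board hPre
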